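-- pv_equiv track=rewrite | github.com/tittake/RL_Project | data/dataloader.py | get_feature_indices
-- ===== SOURCE A (Python) =====
-- features  = {"ee_location":   ("boom_x", "boom_y"),
--              "joints":        ("theta1", "theta2", "xt2"),
--              "torques":       ("fc1", "fc2", "fct2"),
--              "velocities":    ("boom_x_velocity", "boom_y_velocity"),
--              "accelerations": ("boom_x_acceleration", "boom_y_acceleration")
--              }
--
-- def get_feature_indices(feature_names, query_feature):
--     """
--     return start and end indices for feature in feature_names
--
--     args:
--         feature_names: list of features (either X_features or y_features)
--         query_feature: the name of the feature whose indices you want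
--     returns:
--         start_index
--         end_index
--     """
--
--     assert query_feature in feature_names
--
--     index = 0
--
--     for feature in feature_names:
--         if query_feature == feature:
--             return index, index + len(features[feature])
--         else:
--             index += len(features[feature])
-- ===== SOURCE B (Python) =====
-- features  = {"ee_location":   ("boom_x", "boom_y"),
--              "joints":        ("theta1", "theta2", "xt2"),
--              "torques":       ("fc1", "fc2", "fct2"),
--              "velocities":    ("boom_x_velocity", "boom_y_velocity"),
--              "accelerations": ("boom_x_acceleration", "boom_y_acceleration")
--              }
--
-- def get_feature_indices(feature_names, query_feature):
--     assert query_feature in feature_names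
--     head = feature_names[0]
--     n = len(features[head])
--     if head == query_feature:
--         return 0, n
--     start, end = get_feature_indices(feature_names[1:], query_feature)
--     return start + n, end + n
-- ===== Notes on version B (the rewrite author's own statement) =====
-- stated objective: alternative
-- what changed: Replaces A's single forward loop with a mutating index accumulator by structural recursion on the list: the base case returns (0, len(block)) at the first match and each enclosing level shifts both indices up by its head feature's block length, so the answer is assembled back-to-front with no accumulator.
import Mathlib
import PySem

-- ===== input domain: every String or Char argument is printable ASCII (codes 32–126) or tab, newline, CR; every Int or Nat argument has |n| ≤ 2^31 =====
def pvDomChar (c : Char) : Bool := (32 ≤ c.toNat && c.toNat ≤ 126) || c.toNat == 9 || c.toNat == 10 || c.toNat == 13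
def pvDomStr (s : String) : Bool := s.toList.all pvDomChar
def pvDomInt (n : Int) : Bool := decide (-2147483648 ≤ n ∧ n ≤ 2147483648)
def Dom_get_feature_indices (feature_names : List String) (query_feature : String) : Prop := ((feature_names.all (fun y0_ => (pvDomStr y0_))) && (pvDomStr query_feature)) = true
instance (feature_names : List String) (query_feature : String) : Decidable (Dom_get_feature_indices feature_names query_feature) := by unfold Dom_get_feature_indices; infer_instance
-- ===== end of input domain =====

-- B replaces A's accumulating loop by structural recursion that shifts the result from the base case (objective: alternative).


-- The module-level 'features' dict. Its tuple values have mixed arities and only their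
-- lengths are ever used (len(features[f])), so each value is ported as its tuple length.
def pvFeatures : PySem.Dict String Int :=
  PySem.Dict.ofList [("ee_location", 2), ("joints", 3), ("torques", 3),
                     ("velocities", 2), ("accelerations", 2)]

-- len(features[f]); none = KeyError (those inputs are excluded by Pre_)
def pvFlen? (f : String) : Option Int := PySem.Dict.get? pvFeatures f

-- ===== PORT A =====
-- A's loop: walk the list keeping a running index, return at the first match.
-- Falling off the end (Python returns None) and KeyError are outside Pre_; getD 0 there.
def pvLoopA (q : String) : List String → Int → Int × Int
  | [], _ => (0, 0)
  | f :: rest, idx =>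
      if q == f then (idx, idx + (pvFlen? f).getD 0)
      else pvLoopA q rest (idx + (pvFlen? f).getD 0)

def get_feature_indices (feature_names : List String) (query_feature : String) : Int × Int :=
  pvLoopA query_feature feature_names 0

-- ===== PORT B =====
-- B: recursion on the list; base case (0, len(block)) at the first match, each level
-- shifts both indices by its head's block length. Empty list = assert failure (outside Pre_).
def get_feature_indices_alt (feature_names : List String) (query_feature : String) : Int × Int :=
  match feature_names with
  | [] => (0, 0)
  | head :: rest =>
      let n := (pvFlen? head).getD 0
      if head == query_feature then (0, n)
      else
        let se := get_feature_indices_alt rest query_feature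
        (se.1 + n, se.2 + n)

-- ===== PRECONDITION & SPEC =====
-- Pre_ = exactly where A returns: the assert holds (query occurs in the list) and every
-- feature A looks up — those strictly before the first occurrence, plus the query itself —
-- is a key of the features dict (otherwise Python raises KeyError).
def Pre_get_feature_indices (feature_names : List String) (query_feature : String) : Prop :=
  query_feature ∈ feature_names ∧ (pvFlen? query_feature).isSome = true ∧
  ∀ f ∈ feature_names.takeWhile (fun s => s != query_feature), (pvFlen? f).isSome = true
instance (feature_names : List String) (query_feature : String) : Decidable (Pre_get_feature_indices feature_names query_feature) := by unfold Pre_get_feature_indices; infer_instance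

def pvWitness_get_feature_indices : List String × String := (["ee_location", "joints"], "joints")

def Spec_get_feature_indices (feature_names : List String) (query_feature : String) (out : Int × Int) : Prop := out = get_feature_indices_alt feature_names query_feature
instance (feature_names : List String) (query_feature : String) (out : Int × Int) : Decidable (Spec_get_feature_indices feature_names query_feature out) := by unfold Spec_get_feature_indices; infer_instance

-- ===== CLAIM (what is proved, stated in full; the proofs are below) =====
def Claim_equal_get_feature_indices : Prop := ∀ (feature_names : List String) (query_feature : String), Dom_get_feature_indices feature_names query_feature → Pre_get_feature_indices feature_names query_feature → Spec_get_feature_indices feature_names query_feature (get_feature_indices feature_names query_feature)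

-- ===== LEMMAS AND PROOFS =====

lemma loopA_eq_alt (q : String) : ∀ (names : List String) (idx : Int), q ∈ names →
    pvLoopA q names idx =
      (idx + (get_feature_indices_alt names q).1, idx + (get_feature_indices_alt names q).2) := by
  intro names
  induction names with
  | nil => intro idx h; cases h
  | cons f rest ih =>
    intro idx hmem
    by_cases hq : f = q
    · subst hq
      simp [pvLoopA, get_feature_indices_alt]
    · have hmem' : q ∈ rest := by
        cases hmem with
        | head => exact absurd rfl hq
        | tail _ h => exact h
      have h1 : (q == f) = false := by rw [beq_eq_false_iff_ne]; exact fun h => hq h.symm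
      have h2 : (f == q) = false := by simp [hq]
      rw [pvLoopA, h1]
      simp only [Bool.false_eq_true, if_false]
      rw [ih _ hmem']
      conv_rhs => rw [get_feature_indices_alt]
      rw [h2]
      simp only [Bool.false_eq_true, if_false, Prod.mk.injEq]
      constructor <;> ring

-- ===== VERDICT (by name: the statement is the Claim_ definition above) =====
theorem get_feature_indices_spec : Claim_equal_get_feature_indices := by
  intro names q _ hpre
  unfold Spec_get_feature_indices get_feature_indices
  rw [loopA_eq_alt q names 0 hpre.1]
  simp
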